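-- pv_equiv track=rewrite | github.com/yerartdev/introduccion-a-python | lyrics.py | get_more_often_user_words
-- ===== SOURCE A (Python) =====
-- def most_common_words(frequencies):
--     """
--     Return a tuple containing:
--     * The number of occurences of a word in the first tuple element
--     * A list containing the words with that frequency
--     """
--     values = frequencies.values()
--     #max = max(values)
--     maxim = max(values)
--
--     words = []
--     for word, score in frequencies.items():
--         #if score == max(value):
--         if score == max(values):
--             words.append(word)
--     #return (max, words)
--     return (maxim, words)
--
-- def get_more_often_user_words(frequencies, threshold=10):
--     """
--     Return a list of the words that are used more often, above
--     the *optional* threshold. If no threshold is passed, use 10.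
--     """
--     result = list() #::GMG::New
--     frequencies = frequencies.copy() #::GMG::New
--
--     while True:
--         score = most_common_words(frequencies)
--         if score[0] < threshold:
--             break
--         for w in score[1]:
--             del frequencies[w]
--         result.append(score)
--
--     return result
-- ===== SOURCE B (Python) =====
-- def get_more_often_user_words(frequencies, threshold=10):
--     """
--     Return a list of the words that are used more often, above
--     the *optional* threshold. If no threshold is passed, use 10.
--     """
--     groups = {}
--     for word, score in frequencies.items():
--         groups[score] = groups.get(score, []) + [word]
--     return [(s, groups[s]) for s in sorted(groups, reverse=True) if s >= threshold]
-- ===== Notes on version B (the rewrite author's own statement) =====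
-- stated objective: faster
-- what changed: Replaces A's repeated scan-for-max-then-delete loop over the dict with a single group-by-frequency pass plus one descending sort of the distinct frequencies.
-- crash fix: A raises ValueError (max() of an emptied dict) when the dict is empty or every stored frequency is >= threshold; B then returns the full list of frequency groups ([] for the empty dict). — e.g. on get_more_often_user_words([("a", 12)], 10): A raises ValueError, B returns [(12, ["a"])]
import Mathlib
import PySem

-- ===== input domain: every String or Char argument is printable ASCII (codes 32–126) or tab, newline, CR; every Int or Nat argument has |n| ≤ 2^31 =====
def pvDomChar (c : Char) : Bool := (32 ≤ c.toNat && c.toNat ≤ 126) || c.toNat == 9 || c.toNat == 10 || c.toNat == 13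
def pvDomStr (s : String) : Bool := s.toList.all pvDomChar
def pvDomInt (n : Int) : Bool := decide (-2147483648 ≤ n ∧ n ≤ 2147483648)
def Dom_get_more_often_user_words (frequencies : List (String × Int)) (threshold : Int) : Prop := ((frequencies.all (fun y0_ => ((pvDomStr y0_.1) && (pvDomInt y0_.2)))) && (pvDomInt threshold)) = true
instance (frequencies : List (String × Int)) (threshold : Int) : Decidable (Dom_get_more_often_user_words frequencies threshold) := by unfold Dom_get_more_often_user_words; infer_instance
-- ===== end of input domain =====

-- B replaces A's repeated max-scan-and-delete loop (O(n²·k)) by one grouping pass plus a sort of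
-- the distinct frequencies (O(n·k + k log k)); return values are identical wherever A returns.

-- ===== PORT A =====
-- most_common_words: maxim = max(values); then scan items appending words whose score equals the max
def pvMostCommonWords (d : PySem.Dict String Int) : Option (Int × List String) :=
  match PySem.List.max? d.values (fun v => v) with
  | none => none   -- Python: max() on an empty dict raises ValueError (excluded by Pre_)
  | some maxim =>
      some (maxim, d.items.foldl (fun words p => if p.2 == maxim then words ++ [p.1] else words) [])

-- the 'while True' loop; each executed iteration deletes at least one key, so size+1 fuel is never exhausted
def pvLoopA (threshold : Int) : Nat → PySem.Dict String Int → List (Int × List String) → List (Int × List String)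
  | 0, _, result => result
  | fuel+1, d, result =>
    match pvMostCommonWords d with
    | none => result   -- unreachable under Pre_ (Python raises ValueError here)
    | some score =>
      if score.1 < threshold then result
      else pvLoopA threshold fuel (score.2.foldl (fun d w => d.erase w) d) (result ++ [score])

def get_more_often_user_words (frequencies : List (String × Int)) (threshold : Int) : List (Int × List String) :=
  let d := PySem.Dict.ofList frequencies
  pvLoopA threshold (d.size + 1) d []

-- ===== PORT B =====
def get_more_often_user_words_alt (frequencies : List (String × Int)) (threshold : Int) : List (Int × List String) :=
  let d := PySem.Dict.ofList frequencies
  let groups := d.items.foldl (fun g p => g.modify p.2 [] (fun ws => ws ++ [p.1])) PySem.Dict.empty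
  ((PySem.List.sorted groups.keys (fun s => s) true).filter (fun s => decide (threshold ≤ s))).map
    (fun s => (s, groups.getD s []))

-- ===== PRECONDITION & SPEC =====
-- Pre_ excludes exactly the inputs on which A raises ValueError (max() of an emptied dict):
-- the dict is empty, or every stored frequency is ≥ threshold so the loop drains the dict.
def Pre_get_more_often_user_words (frequencies : List (String × Int)) (threshold : Int) : Prop :=
  ∃ v ∈ (PySem.Dict.ofList frequencies).values, v < threshold
instance (frequencies : List (String × Int)) (threshold : Int) : Decidable (Pre_get_more_often_user_words frequencies threshold) := by unfold Pre_get_more_often_user_words; infer_instance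
def pvWitness_get_more_often_user_words : (List (String × Int)) × Int := ([("a", 5), ("b", 1)], 3)

-- A raises ValueError when the dict is empty or all (deduplicated) frequencies are ≥ threshold;
-- B then returns the full list of groups ([] for the empty dict).
def Raises_get_more_often_user_words (frequencies : List (String × Int)) (threshold : Int) : Prop :=
  ∀ v ∈ (PySem.Dict.ofList frequencies).values, threshold ≤ v
instance (frequencies : List (String × Int)) (threshold : Int) : Decidable (Raises_get_more_often_user_words frequencies threshold) := by unfold Raises_get_more_often_user_words; infer_instance
def pvRaiseWitness_get_more_often_user_words : (List (String × Int)) × Int := ([("a", 12)], 10)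
def pvRaiseWitnessOut_get_more_often_user_words : List (Int × List String) := [(12, ["a"])]

def Spec_get_more_often_user_words (frequencies : List (String × Int)) (threshold : Int) (out : List (Int × List String)) : Prop := out = get_more_often_user_words_alt frequencies threshold
instance (frequencies : List (String × Int)) (threshold : Int) (out : List (Int × List String)) : Decidable (Spec_get_more_often_user_words frequencies threshold out) := by unfold Spec_get_more_often_user_words; infer_instance

-- ===== CLAIM (what is proved, stated in full; the proofs are below) =====
def Claim_equal_get_more_often_user_words : Prop := ∀ (frequencies : List (String × Int)) (threshold : Int), Dom_get_more_often_user_words frequencies threshold → Pre_get_more_often_user_words frequencies threshold → Spec_get_more_often_user_words frequencies threshold (get_more_often_user_words frequencies threshold)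
def Claim_raises_get_more_often_user_words : Prop := (∀ (frequencies : List (String × Int)) (threshold : Int), Dom_get_more_often_user_words frequencies threshold → Raises_get_more_often_user_words frequencies threshold → ¬ Pre_get_more_often_user_words frequencies threshold) ∧ (Dom_get_more_often_user_words (pvRaiseWitness_get_more_often_user_words.1) (pvRaiseWitness_get_more_often_user_words.2) ∧ Raises_get_more_often_user_words (pvRaiseWitness_get_more_often_user_words.1) (pvRaiseWitness_get_more_often_user_words.2) ∧ get_more_often_user_words_alt (pvRaiseWitness_get_more_often_user_words.1) (pvRaiseWitness_get_more_often_user_words.2) = pvRaiseWitnessOut_get_more_often_user_words)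

-- ===== LEMMAS AND PROOFS =====

-- words of l having score s, in list order (the value both programs attach to the group s)
def pvWords (l : List (String × Int)) (s : Int) : List String :=
  (l.filter (fun p => p.2 == s)).map (·.1)

-- common normal form: groups in strictly decreasing score order, scores ≥ t only
def pvSpecList (l : List (String × Int)) (t : Int) : List (Int × List String) :=
  ((PySem.List.sorted (PySem.Set.ofList (l.map (·.2))) (fun s => s) true).filter (fun s => decide (t ≤ s))).map
    (fun s => (s, pvWords l s))

lemma pv_foldl_erase_items : ∀ (ws : List String) (l : List (String × Int)),
    ((ws.foldl (fun d w => d.erase w) (PySem.Dict.mk l)) : PySem.Dict String Int).items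
      = l.filter (fun p => !(ws.contains p.1)) := by
  intro ws
  induction ws with
  | nil => intro l; simp
  | cons w ws ih =>
    intro l
    simp only [List.foldl_cons]
    have : (PySem.Dict.mk l).erase w = PySem.Dict.mk (l.filter (fun p => !(p.1 == w))) := rfl
    rw [this, ih, List.filter_filter]
    apply List.filter_congr
    intro p _
    simp only [List.contains_cons, Bool.not_or]
    by_cases hw : w = p.1 <;> simp [hw, Bool.and_comm]

lemma pv_B_eq_specList (frequencies : List (String × Int)) (threshold : Int) :
    get_more_often_user_words_alt frequencies threshold
      = pvSpecList (PySem.Dict.ofList frequencies).items threshold := by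
  unfold get_more_often_user_words_alt pvSpecList
  simp only []
  set l := (PySem.Dict.ofList frequencies).items with hl
  have hkeys : (l.foldl (fun g p => g.modify p.2 [] (fun ws => ws ++ [p.1])) PySem.Dict.empty).keys
      = PySem.Set.ofList (l.map (·.2)) := by
    rw [PySem.Dict.keys_foldl_modify_key l (fun p => p.2) [] (fun _ p ws => ws ++ [p.1])]
    simp [PySem.Set.update, PySem.Set.ofList, PySem.Dict.keys_empty, PySem.Set.empty]
  have hgetD : ∀ s : Int,
      (l.foldl (fun g p => g.modify p.2 [] (fun ws => ws ++ [p.1])) PySem.Dict.empty).getD s []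
        = pvWords l s := by
    intro s
    have hswap : l.foldl (fun g p => g.modify p.2 [] (fun ws => ws ++ [p.1])) PySem.Dict.empty
        = (l.map (fun p => (p.2, p.1))).foldl (fun g q => g.modify q.1 [] (fun ws => ws ++ [q.2])) PySem.Dict.empty := by
      rw [List.foldl_map]
    rw [hswap, PySem.Dict.getD_foldl_modify_append]
    simp [pvWords, List.filter_map, Function.comp_def]
  rw [hkeys]
  apply List.map_congr_left
  intro s _
  rw [hgetD]

lemma pv_specList_nil_of_max_lt (l : List (String × Int)) (t m : Int)
    (hm : PySem.List.max? (l.map (·.2)) (fun v => v) = some m) (hlt : m < t) :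
    pvSpecList l t = [] := by
  unfold pvSpecList
  rw [List.filter_eq_nil_iff.mpr, List.map_nil]
  intro s hs
  have : s ∈ l.map (·.2) := by
    have := (PySem.List.mem_sorted _ _ _ s).mp hs
    exact (PySem.Set.mem_ofList _ _).mp this
  have := PySem.List.max?_isMax hm s this
  simp only [decide_eq_true_eq]
  omega

lemma pv_specList_cons (l : List (String × Int)) (t m : Int)
    (hm : PySem.List.max? (l.map (·.2)) (fun v => v) = some m) (hle : t ≤ m) :
    pvSpecList l t = (m, pvWords l m) :: pvSpecList (l.filter (fun p => !(p.2 == m))) t := by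
  have hmmem : m ∈ l.map (·.2) := PySem.List.max?_mem hm
  have hmax : ∀ y ∈ l.map (·.2), y ≤ m := PySem.List.max?_isMax hm
  set l' := l.filter (fun p => !(p.2 == m)) with hl'
  have hmem' : ∀ x : Int, x ∈ l'.map (·.2) ↔ x ∈ l.map (·.2) ∧ x ≠ m := by
    intro x
    simp only [hl', List.mem_map, List.mem_filter]
    constructor
    · rintro ⟨p, ⟨hp, hne⟩, rfl⟩
      simp only [Bool.not_eq_eq_eq_not, Bool.not_true, beq_eq_false_iff_ne] at hne
      exact ⟨⟨p, hp, rfl⟩, hne⟩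
    · rintro ⟨⟨p, hp, rfl⟩, hne⟩
      exact ⟨p, ⟨hp, by simpa using hne⟩, rfl⟩
  have hnodupS' : (PySem.List.sorted (PySem.Set.ofList (l'.map (·.2))) (fun s => s) true).Nodup :=
    ((PySem.List.sorted_perm _ _ _).nodup_iff).mpr (PySem.Set.nodup_ofList _)
  have hmemS' : ∀ x : Int, x ∈ PySem.List.sorted (PySem.Set.ofList (l'.map (·.2))) (fun s => s) true
      ↔ x ∈ l.map (·.2) ∧ x ≠ m := by
    intro x
    rw [PySem.List.mem_sorted, PySem.Set.mem_ofList, hmem']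
  have hsorted : PySem.List.sorted (PySem.Set.ofList (l.map (·.2))) (fun s => s) true
      = m :: PySem.List.sorted (PySem.Set.ofList (l'.map (·.2))) (fun s => s) true := by
    apply PySem.List.sorted_rev_eq_of_perm_of_pairwise_gt
    · apply List.perm_of_nodup_nodup_toFinset_eq
      · refine List.Nodup.cons ?_ hnodupS'
        intro hmem
        exact ((hmemS' m).mp hmem).2 rfl
      · exact PySem.Set.nodup_ofList _
      · ext x
        simp only [List.mem_toFinset, List.mem_cons, hmemS', PySem.Set.mem_ofList]
        constructor
        · rintro (rfl | ⟨hx, _⟩) <;> [exact hmmem; exact hx]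
        · intro hx
          by_cases hxm : x = m
          · exact Or.inl hxm
          · exact Or.inr ⟨hx, hxm⟩
    · refine List.Pairwise.cons ?_ ?_
      · intro b hb
        have := (hmemS' b).mp hb
        have := hmax b this.1
        have hne := ((hmemS' b).mp hb).2
        omega
      · have h1 := PySem.List.sorted_pairwise_rev (PySem.Set.ofList (l'.map (·.2))) (fun s : Int => s)
        have h2 := List.Pairwise.and h1 hnodupS'
        exact h2.imp (fun {a b} h => lt_of_le_of_ne h.1 (Ne.symm h.2))
  unfold pvSpecList
  rw [hsorted]
  have hfil : decide (t ≤ m) = true := by simpa using hle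
  simp only [List.filter_cons, hfil, if_pos]
  rw [List.map_cons]
  congr 1
  apply List.map_congr_left
  intro s hs
  have hsm : s ≠ m := by
    have := (hmemS' s).mp (List.mem_filter.mp hs).1
    exact this.2
  have : pvWords l' s = pvWords l s := by
    unfold pvWords
    rw [hl', List.filter_filter]
    congr 1
    apply List.filter_congr
    intro p _
    by_cases hp : p.2 = s
    · simp [hp, hsm]
    · simp [hp]
  rw [this]

lemma pv_loopA_eq : ∀ (n : Nat) (l : List (String × Int)) (t : Int) (acc : List (Int × List String)),
    l.length < n → (l.map (·.1)).Nodup → (∃ p ∈ l, p.2 < t) →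
    pvLoopA t n (PySem.Dict.mk l) acc = acc ++ pvSpecList l t := by
  intro n
  induction n with
  | zero => intro l t acc h; omega
  | succ n ih =>
    intro l t acc hlen hnd hex
    have hlne : l.map (·.2) ≠ [] := by
      rcases hex with ⟨p, hp, _⟩
      simp only [ne_eq, List.map_eq_nil_iff]
      rintro rfl; simp at hp
    obtain ⟨m, hm⟩ : ∃ m, PySem.List.max? (l.map (·.2)) (fun v => v) = some m := by
      rcases h : PySem.List.max? (l.map (·.2)) (fun v => v) with _ | m
      · exact absurd ((PySem.List.max?_eq_none_iff _ _).mp h) hlne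
      · exact ⟨m, h⟩
    have hvals : (PySem.Dict.mk l).values = l.map (·.2) := rfl
    have hitems : (PySem.Dict.mk l).items = l := rfl
    have hmcw : pvMostCommonWords (PySem.Dict.mk l) = some (m, pvWords l m) := by
      unfold pvMostCommonWords
      rw [hvals, hm]
      show some (m, l.foldl (fun words p => if p.2 == m then words ++ [p.1] else words) []) = _
      rw [PySem.List.foldl_append_if (fun p => p.2 == m) (fun p => p.1) l []]
      simp [pvWords]
    simp only [pvLoopA, hmcw]
    by_cases hlt : m < t
    · rw [if_pos hlt, pv_specList_nil_of_max_lt l t m hm hlt, List.append_nil]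
    · rw [if_neg hlt]
      have hle : t ≤ m := by omega
      set l' := l.filter (fun p => !(p.2 == m)) with hl'
      have herase : ((pvWords l m).foldl (fun d w => d.erase w) (PySem.Dict.mk l))
          = PySem.Dict.mk l' := by
        apply PySem.Dict.ext
        rw [pv_foldl_erase_items]
        apply List.filter_congr
        intro p hp
        have hiff : (pvWords l m).contains p.1 = (p.2 == m) := by
          by_cases h2 : p.2 = m
          · have hmem : p.1 ∈ pvWords l m :=
              List.mem_map.mpr ⟨p, List.mem_filter.mpr ⟨hp, by simp [h2]⟩, rfl⟩
            simp [List.contains_eq_mem, hmem, h2]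
          · have hmem : p.1 ∉ pvWords l m := by
              unfold pvWords
              simp only [List.mem_map, List.mem_filter]
              rintro ⟨q, ⟨hq, hqm⟩, hq1⟩
              have hqp := List.inj_on_of_nodup_map hnd hq hp hq1
              subst hqp
              exact h2 (by simpa using hqm)
            simp [List.contains_eq_mem, hmem, h2]
        rw [hiff]
      rw [herase]
      have hlen' : l'.length < n := by
        have : l'.length < l.length := by
          apply List.length_filter_lt_length_iff_exists.mpr
          rcases List.mem_map.mp (PySem.List.max?_mem hm) with ⟨p, hp, hpm⟩
          exact ⟨p, hp, by simp [hpm]⟩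
        omega
      have hnd' : (l'.map (·.1)).Nodup :=
        (List.Sublist.map (fun p : String × Int => p.1) List.filter_sublist).nodup hnd
      have hex' : ∃ p ∈ l', p.2 < t := by
        rcases hex with ⟨p, hp, hpt⟩
        refine ⟨p, List.mem_filter.mpr ⟨hp, ?_⟩, hpt⟩
        simp only [Bool.not_eq_eq_eq_not, Bool.not_true, beq_eq_false_iff_ne]
        omega
      rw [ih l' t (acc ++ [(m, pvWords l m)]) hlen' hnd' hex']
      rw [pv_specList_cons l t m hm hle, ← hl']
      simp

-- ===== VERDICT (by name: the statement is the Claim_ definition above) =====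
theorem get_more_often_user_words_spec : Claim_equal_get_more_often_user_words := by
  unfold Claim_equal_get_more_often_user_words
  intro frequencies threshold _ hpre
  unfold Spec_get_more_often_user_words
  rw [pv_B_eq_specList]
  unfold get_more_often_user_words
  simp only []
  set d := PySem.Dict.ofList frequencies with hd
  have hmk : d = PySem.Dict.mk d.items := rfl
  have hnd : (d.items.map (·.1)).Nodup := PySem.Dict.nodup_keys_ofList frequencies
  have hex : ∃ p ∈ d.items, p.2 < threshold := by
    rcases hpre with ⟨v, hv, hvt⟩
    rcases List.mem_map.mp hv with ⟨p, hp, hpv⟩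
    exact ⟨p, hp, by rw [hpv]; exact hvt⟩
  have hlen : d.items.length < d.size + 1 := Nat.lt_succ_self _
  calc pvLoopA threshold (d.size + 1) d []
      = pvLoopA threshold (d.size + 1) (PySem.Dict.mk d.items) [] := by rw [← hmk]
    _ = [] ++ pvSpecList d.items threshold := pv_loopA_eq _ _ _ _ hlen hnd hex
    _ = pvSpecList d.items threshold := by simp

@[simp] theorem get_more_often_user_words_raises : Claim_raises_get_more_often_user_words := by
  unfold Claim_raises_get_more_often_user_words
  refine ⟨?_, by decide⟩
  intro frequencies threshold _ hR hPre
  rcases hPre with ⟨v, hv, hvt⟩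
  have := hR v hv
  omega
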